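-- pv_equiv track=rewrite | github.com/GuiMarion/Cryptography | Vigenere.py | epurer2
-- ===== SOURCE A (Python) =====
-- def epurer2(Liste):
--     dic = {}
--     Liste.sort()
--     for a in Liste:
--         dic[a]=0
--         for b in Liste:
--             if b%a ==0:
--                 dic[a]+=1
--     dic = sorted(dic.items(), key=lambda t: t[1])
--     k = len(dic)-1
--     #while k>0 and (dic[k-1][0] % dic[k][0]) == 0:
--     #    k = k -1
--
--     Output = []
--     for elem in dic:
--         if elem[1] > 1:
--             Output.append(elem[0])
--     return Output
-- ===== SOURCE B (Python) =====
-- def epurer2(Liste):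
--     # Divisor-enumeration rewrite: frequency dict + per-value divisor
--     # enumeration up to sqrt(|b|) replaces A's quadratic double scan.
--     Liste.sort()
--     freq = {}
--     for x in Liste:
--         freq[x] = freq.get(x, 0) + 1
--     cnt = {}
--     for a in freq:
--         cnt[a] = 0
--     for b, c in freq.items():
--         m = abs(b)
--         d = 1
--         while d * d <= m:
--             if m % d == 0:
--                 e = m // d
--                 ts = (d, -d) if e == d else (d, -d, e, -e)
--                 for t in ts:
--                     if t in cnt:
--                         cnt[t] += c
--             d += 1
--     order = sorted(cnt.items(), key=lambda t: t[1])
--     return [a for a, c in order if c > 1]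
-- ===== Notes on version B (the rewrite author's own statement) =====
-- stated objective: faster
-- what changed: A counts, for every element a, the multiples of a by a full inner scan of the list (quadratic in the list length); B builds a frequency dict once and credits each distinct value's count to its divisors found by trial division up to sqrt(|b|), so no inner scan over the list remains.
-- outside the precondition, e.g. on epurer2([0, 2]): A raises ZeroDivisionError, B returns []
import Mathlib
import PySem

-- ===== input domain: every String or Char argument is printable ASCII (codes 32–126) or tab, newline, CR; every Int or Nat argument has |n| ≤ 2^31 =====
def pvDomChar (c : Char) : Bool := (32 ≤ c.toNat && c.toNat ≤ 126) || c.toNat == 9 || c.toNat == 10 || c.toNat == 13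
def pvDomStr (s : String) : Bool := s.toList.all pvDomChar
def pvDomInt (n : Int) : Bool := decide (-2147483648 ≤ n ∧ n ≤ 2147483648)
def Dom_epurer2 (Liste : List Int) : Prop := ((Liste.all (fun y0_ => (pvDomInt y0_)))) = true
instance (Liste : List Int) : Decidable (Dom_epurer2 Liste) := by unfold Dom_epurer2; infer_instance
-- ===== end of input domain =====

-- B replaces A's quadratic double scan by a frequency dict plus per-value trial-division
-- divisor enumeration (objective: alternative algorithm, same return value).
-- Note: the Python A sorts its argument in place; the equivalence proved here is about
-- the RETURN value only (the Python B performs the same in-place sort).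

-- ===== PORT A =====
def epurer2 (Liste : List Int) : List Int :=
  let s := PySem.List.sorted Liste (fun x => x) false
  let dic := s.foldl (fun dic a =>
      s.foldl (fun dic b =>
          if PySem.Int.mod b a = 0 then dic.insert a (dic.getD a 0 + 1) else dic)
        (dic.insert a 0))
    (PySem.Dict.empty : PySem.Dict Int Int)
  let dic2 := PySem.List.sorted dic.items (fun t => t.2) false
  dic2.foldl (fun Output elem => if elem.2 > 1 then Output ++ [elem.1] else Output) ([] : List Int)

-- ===== PORT B =====
-- helpers for Source B's divisor-enumeration while-loop
def pvDivTuple (m d : Nat) : List Int :=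
  if m / d = d then [(d : Int), -(d : Int)]
  else [(d : Int), -(d : Int), ((m / d : Nat) : Int), -((m / d : Nat) : Int)]

def pvUpd (c : Int) (cnt : PySem.Dict Int Int) (t : Int) : PySem.Dict Int Int :=
  if cnt.contains t then cnt.modify t 0 (· + c) else cnt

def pvSieve (m : Nat) (c : Int) (d : Nat) (cnt : PySem.Dict Int Int) : PySem.Dict Int Int :=
  if h : 0 < d ∧ d * d ≤ m then
    pvSieve m c (d + 1) (if m % d = 0 then (pvDivTuple m d).foldl (pvUpd c) cnt else cnt)
  else cnt
termination_by m + 1 - d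
decreasing_by have : d ≤ d * d := Nat.le_mul_of_pos_left d h.1; omega

def epurer2_alt (Liste : List Int) : List Int :=
  let s := PySem.List.sorted Liste (fun x => x) false
  let freq := s.foldl (fun d x => d.insert x (d.getD x 0 + 1)) (PySem.Dict.empty : PySem.Dict Int Int)
  let cnt0 := freq.keys.foldl (fun d a => d.insert a (0 : Int)) (PySem.Dict.empty : PySem.Dict Int Int)
  let cnt := freq.items.foldl (fun d bc => pvSieve bc.1.natAbs bc.2 1 d) cnt0
  let order := PySem.List.sorted cnt.items (fun t => t.2) false
  (order.filter (fun e => e.2 > 1)).map (fun e => e.1)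

-- ===== PRECONDITION & SPEC =====
-- Pre_ excludes lists containing 0: there A's 'b % a' divides by zero (ZeroDivisionError).
def Pre_epurer2 (Liste : List Int) : Prop := (0 : Int) ∉ Liste
instance (Liste : List Int) : Decidable (Pre_epurer2 Liste) := by unfold Pre_epurer2; infer_instance
def pvWitness_epurer2 : List Int := [3, 2, 4, 2]

def Spec_epurer2 (Liste : List Int) (out : List Int) : Prop := out = epurer2_alt Liste
instance (Liste : List Int) (out : List Int) : Decidable (Spec_epurer2 Liste out) := by unfold Spec_epurer2; infer_instance

-- ===== CLAIM (what is proved, stated in full; the proofs are below) =====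
def Claim_equal_epurer2 : Prop := ∀ (Liste : List Int), Dom_epurer2 Liste → Pre_epurer2 Liste → Spec_epurer2 Liste (epurer2 Liste)

-- ===== LEMMAS AND PROOFS =====

-- the multiset of divisors produced by the whole while-loop, as one list
def pvDivs (m d : Nat) : List Int :=
  if h : 0 < d ∧ d * d ≤ m then (if m % d = 0 then pvDivTuple m d else []) ++ pvDivs m (d + 1)
  else []
termination_by m + 1 - d
decreasing_by have : d ≤ d * d := Nat.le_mul_of_pos_left d h.1; omega

-- the count each element a receives from A's inner scan, as an Int
def pvCA (s : List Int) (a : Int) : Int :=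
  ((s.countP (fun b => decide (PySem.Int.mod b a = 0)) : Nat) : Int)

theorem pvSieve_eq_foldl (m : Nat) (c : Int) (d : Nat) (cnt : PySem.Dict Int Int) :
    pvSieve m c d cnt = (pvDivs m d).foldl (pvUpd c) cnt := by
  rw [pvSieve, pvDivs]
  split
  · rename_i h
    rw [pvSieve_eq_foldl m c (d+1), List.foldl_append]
    split <;> simp
  · simp
termination_by m + 1 - d
decreasing_by rename_i h; have : d ≤ d * d := Nat.le_mul_of_pos_left d h.1; omega

theorem pvUpd_keys (c : Int) (cnt : PySem.Dict Int Int) (t : Int) :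
    (pvUpd c cnt t).keys = cnt.keys := by
  unfold pvUpd
  split
  · rw [PySem.Dict.keys_modify, PySem.Dict.keys_insert_of_contains _ _ ‹_›]
  · rfl

theorem pvUpd_foldl_keys (c : Int) (ts : List Int) (cnt : PySem.Dict Int Int) :
    (ts.foldl (pvUpd c) cnt).keys = cnt.keys := by
  induction ts generalizing cnt with
  | nil => rfl
  | cons t ts ih => simp [List.foldl_cons, ih, pvUpd_keys]

theorem pvOuter_keys (ps : List (Int × Int)) (cnt : PySem.Dict Int Int) :
    (ps.foldl (fun d bc => pvSieve bc.1.natAbs bc.2 1 d) cnt).keys = cnt.keys := by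
  induction ps generalizing cnt with
  | nil => rfl
  | cons bc ps ih =>
    rw [List.foldl_cons, ih, pvSieve_eq_foldl, pvUpd_foldl_keys]

theorem pvUpd_foldl_getD (c : Int) (ts : List Int) (cnt : PySem.Dict Int Int) (x : Int)
    (hx : cnt.contains x = true) :
    (ts.foldl (pvUpd c) cnt).getD x 0 = cnt.getD x 0 + c * (ts.count x : Int) := by
  induction ts generalizing cnt with
  | nil => simp
  | cons t ts ih =>
    rw [List.foldl_cons]
    by_cases hct : cnt.contains t
    · have hstep : pvUpd c cnt t = cnt.modify t 0 (· + c) := by simp [pvUpd, hct]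
      have hx' : (cnt.modify t 0 (· + c)).contains x = true := by
        rw [PySem.Dict.contains_modify]; simp [hx]
      rw [hstep, ih _ hx', PySem.Dict.getD_modify]
      by_cases hxt : x = t
      · subst hxt
        simp
        ring
      · have : (t == x) = false := by simp [Ne.symm hxt]
        simp [hxt, List.count_cons, this]
    · have hstep : pvUpd c cnt t = cnt := by simp [pvUpd, hct]
      have hxt : x ≠ t := fun h => hct (h ▸ hx)
      have : (t == x) = false := by simp [Ne.symm hxt]
      rw [hstep, ih _ hx]
      simp [List.count_cons, this]

theorem pvOuter_getD (ps : List (Int × Int)) (cnt : PySem.Dict Int Int) (x : Int)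
    (hx : cnt.contains x = true) :
    (ps.foldl (fun d bc => pvSieve bc.1.natAbs bc.2 1 d) cnt).getD x 0
      = cnt.getD x 0 + (ps.map (fun bc => bc.2 * ((pvDivs bc.1.natAbs 1).count x : Int))).sum := by
  induction ps generalizing cnt with
  | nil => simp
  | cons bc ps ih =>
    have hx' : (pvSieve bc.1.natAbs bc.2 1 cnt).contains x = true := by
      rw [PySem.Dict.contains_eq_decide_mem_keys, pvSieve_eq_foldl, pvUpd_foldl_keys,
        ← PySem.Dict.contains_eq_decide_mem_keys]
      exact hx
    rw [List.foldl_cons, ih _ hx', pvSieve_eq_foldl, pvUpd_foldl_getD _ _ _ _ hx]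
    simp [add_assoc]

theorem pvDivTuple_count (m d : Nat) (t : Int) (hd : 0 < d) (hm : 1 ≤ m) (hdvd : d ∣ m) :
    (pvDivTuple m d).count t = if t.natAbs = d ∨ t.natAbs = m / d then 1 else 0 := by
  have he : 0 < m / d := Nat.div_pos (Nat.le_of_dvd (by omega) hdvd) hd
  obtain ⟨k, hk | hk⟩ : ∃ k : Nat, t = (k : Int) ∨ t = -(k : Int) :=
    ⟨t.natAbs, Int.natAbs_eq t⟩ <;>
  · subst hk
    unfold pvDivTuple
    generalize m / d = e at *
    split <;>
    · simp only [List.count_cons, List.count_nil, beq_iff_eq, Int.natAbs_natCast,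
        Int.natAbs_neg, Nat.cast_inj, neg_eq_iff_eq_neg]
      split_ifs <;> omega

theorem pvDivs_count (m d : Nat) (t : Int) (hm : 1 ≤ m) (hd : 0 < d) :
    (pvDivs m d).count t
      = if t.natAbs ∣ m ∧ d ≤ min t.natAbs (m / t.natAbs) then 1 else 0 := by
  rw [pvDivs]
  split
  case isTrue h =>
    rw [List.count_append, pvDivs_count m (d + 1) t hm (by omega)]
    by_cases hmd : m % d = 0
    · have hdvd : d ∣ m := Nat.dvd_of_mod_eq_zero hmd
      rw [if_pos hmd, pvDivTuple_count m d t hd hm hdvd]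
      have hde : d ≤ m / d := (Nat.le_div_iff_mul_le hd).2 h.2
      by_cases hcase : t.natAbs = d ∨ t.natAbs = m / d
      · have hkm : t.natAbs ∣ m := by
          rcases hcase with hc | hc
          · rw [hc]; exact hdvd
          · rw [hc]; exact Nat.div_dvd_of_dvd hdvd
        have hmn : min t.natAbs (m / t.natAbs) = d := by
          rcases hcase with hc | hc
          · rw [hc]; omega
          · rw [hc, Nat.div_div_self hdvd (by omega)]; omega
        have c1 : t.natAbs ∣ m ∧ d ≤ min t.natAbs (m / t.natAbs) := ⟨hkm, by omega⟩
        have c2 : ¬(t.natAbs ∣ m ∧ d + 1 ≤ min t.natAbs (m / t.natAbs)) := by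
          rintro ⟨-, h2⟩; omega
        rw [if_pos hcase, if_pos c1, if_neg c2]
      · rw [if_neg hcase]
        by_cases hkm : t.natAbs ∣ m
        · have hmnne : min t.natAbs (m / t.natAbs) ≠ d := by
            intro hmn
            rcases Nat.le_total t.natAbs (m / t.natAbs) with hle | hle
            · rw [min_eq_left hle] at hmn
              exact hcase (Or.inl hmn)
            · rw [min_eq_right hle] at hmn
              have : t.natAbs = m / d := by
                rw [← hmn, Nat.div_div_self hkm (by omega)]
              exact hcase (Or.inr this)
          simp only [hkm, true_and]
          split_ifs <;> omega
        · simp [hkm]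
    · rw [if_neg hmd]
      simp only [List.count_nil, Nat.zero_add]
      by_cases hkm : t.natAbs ∣ m
      · have hmnne : min t.natAbs (m / t.natAbs) ≠ d := by
          intro hmn
          rcases Nat.le_total t.natAbs (m / t.natAbs) with hle | hle
          · rw [min_eq_left hle] at hmn
            exact hmd ((Nat.mod_eq_zero_of_dvd (hmn ▸ hkm)))
          · rw [min_eq_right hle] at hmn
            exact hmd ((Nat.mod_eq_zero_of_dvd (hmn ▸ Nat.div_dvd_of_dvd hkm)))
        simp only [hkm, true_and]
        split_ifs <;> omega
      · simp [hkm]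
  case isFalse h =>
    simp only [List.count_nil]
    rw [if_neg]
    rintro ⟨h1, h2⟩
    have hke : t.natAbs * (m / t.natAbs) = m := Nat.mul_div_cancel' h1
    have hmm : min t.natAbs (m / t.natAbs) * min t.natAbs (m / t.natAbs) ≤ m := by
      calc min t.natAbs (m / t.natAbs) * min t.natAbs (m / t.natAbs)
          ≤ t.natAbs * (m / t.natAbs) :=
            Nat.mul_le_mul (Nat.min_le_left _ _) (Nat.min_le_right _ _)
        _ = m := hke
    have hdd : d * d ≤ min t.natAbs (m / t.natAbs) * min t.natAbs (m / t.natAbs) :=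
      Nat.mul_le_mul h2 h2
    omega
termination_by m + 1 - d
decreasing_by rename_i hh; have : d ≤ d * d := Nat.le_mul_of_pos_left d hd; omega

theorem pvDivs_count_one (m : Nat) (t : Int) (hm : 1 ≤ m) :
    (pvDivs m 1).count t = if t.natAbs ∣ m then 1 else 0 := by
  rw [pvDivs_count m 1 t hm (by omega)]
  by_cases hkm : t.natAbs ∣ m
  · have h1 : 1 ≤ t.natAbs := Nat.pos_of_dvd_of_pos hkm (by omega)
    have h2 : 1 ≤ m / t.natAbs := Nat.div_pos (Nat.le_of_dvd (by omega) hkm) (by omega)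
    simp only [hkm, true_and, if_pos (by omega : 1 ≤ min t.natAbs (m / t.natAbs))]
    simp
  · simp [hkm]

theorem pv_sum_counts (t u : List Int) (hu : u.Nodup) (hcov : ∀ x ∈ t, x ∈ u) :
    (u.map (fun b => (t.count b : Int))).sum = (t.length : Int) := by
  induction t with
  | nil => simp
  | cons x t ih =>
    have hstep : ∀ b ∈ u, (((x :: t).count b : Nat) : Int)
        = (t.count b : Int) + (if (b == x) = true then (1 : Int) else 0) := by
      intro b _
      by_cases hbx : b = x
      · simp [hbx]
      · simp only [List.count_cons, if_neg (by simp [Ne.symm hbx] : ¬ (x == b) = true)]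
        simp [hbx]
    rw [List.map_congr_left hstep, PySem.List.sum_map_add_int,
      ih (fun y hy => hcov y (List.mem_cons_of_mem x hy)),
      PySem.List.sum_map_ite_one_zero]
    have hcnt : u.countP (fun b => b == x) = 1 := by
      rw [← List.count]
      exact List.count_eq_one_of_mem hu (hcov x List.mem_cons_self)
    rw [hcnt]
    simp [List.length_cons]

theorem pv_sum_countP (s u : List Int) (p : Int → Bool) (hu : u.Nodup) (hcov : ∀ x ∈ s, x ∈ u) :
    (u.map (fun b => (s.count b : Int) * (if p b then (1 : Int) else 0))).sum
      = ((s.countP p : Nat) : Int) := by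
  have hstep : ∀ b ∈ u, (s.count b : Int) * (if p b then (1 : Int) else 0)
      = (((s.filter p).count b : Nat) : Int) := by
    intro b _
    by_cases hpb : p b
    · simp [hpb, List.count_filter hpb]
    · have : (s.filter p).count b = 0 := by
        rw [List.count_eq_zero]
        intro hmem
        exact hpb (List.of_mem_filter hmem)
      simp [hpb, this]
  rw [List.map_congr_left hstep,
    pv_sum_counts (s.filter p) u hu (fun x hx => hcov x (List.mem_of_mem_filter hx)),
    List.countP_eq_length_filter]

theorem pv_insert_getD_self (d : PySem.Dict Int Int) (a : Int)
    (hnd : d.keys.Nodup) (hc : d.contains a = true) :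
    d.insert a (d.getD a 0) = d := by
  apply PySem.Dict.ext
  rw [PySem.Dict.items_insert_of_contains d _ hc]
  conv_rhs => rw [← List.map_id d.items]
  apply List.map_congr_left
  intro q hq
  by_cases hqa : q.1 = a
  · have hmem : (a, q.2) ∈ d.items := by rw [← hqa]; exact hq
    have hv := PySem.Dict.getD_of_mem_items d hmem hnd 0
    simp only [hqa, BEq.rfl, if_true, hv, id_eq]
    rw [← hqa]
  · simp [hqa]

theorem pv_inner_foldl (p : Int → Bool) (l : List Int) (d : PySem.Dict Int Int) (a : Int)
    (hnd : d.keys.Nodup) (hc : d.contains a = true) :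
    l.foldl (fun d b => if p b then d.insert a (d.getD a 0 + 1) else d) d
      = d.insert a (d.getD a 0 + (l.countP p : Nat)) := by
  induction l generalizing d with
  | nil => simpa using (pv_insert_getD_self d a hnd hc).symm
  | cons b l ih =>
    rw [List.foldl_cons]
    by_cases hpb : p b
    · simp only [hpb, if_true]
      have hnd' : (d.insert a (d.getD a 0 + 1)).keys.Nodup := by
        rw [PySem.Dict.keys_insert_of_contains _ _ hc]; exact hnd
      rw [ih _ hnd' (PySem.Dict.contains_insert_self d a _),
        PySem.Dict.getD_insert_self, PySem.Dict.insert_insert_self,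
        List.countP_cons_of_pos (p := p) hpb]
      congr 1
      push_cast
      ring
    · simp only [hpb, if_false, Bool.false_eq_true]
      rw [ih _ hnd hc, List.countP_cons_of_neg (p := p) (by simp [hpb])]

theorem pv_foldl_insert_get? (f : Int → Int) (l : List Int) (d : PySem.Dict Int Int) (x : Int) :
    (l.foldl (fun d a => d.insert a (f a)) d).get? x
      = if x ∈ l then some (f x) else d.get? x := by
  induction l generalizing d with
  | nil => simp
  | cons a l ih =>
    rw [List.foldl_cons, ih]
    by_cases hxl : x ∈ l
    · simp [hxl, List.mem_cons]
    · by_cases hxa : x = a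
      · subst hxa
        simp [hxl, PySem.Dict.get?_insert_self]
      · simp [hxl, hxa, PySem.Dict.get?_insert_of_ne _ _ hxa]

theorem pv_foldl_insert_items (f : Int → Int) (l : List Int) :
    (l.foldl (fun d a => d.insert a (f a)) (PySem.Dict.empty : PySem.Dict Int Int)).items
      = (PySem.Set.ofList l).map (fun a => (a, f a)) := by
  have hkeys : (l.foldl (fun d a => d.insert a (f a)) (PySem.Dict.empty : PySem.Dict Int Int)).keys
      = PySem.Set.ofList l := by
    rw [PySem.Dict.keys_foldl_insert l (fun _ a => f a), PySem.Dict.keys_empty,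
      PySem.Set.update_nil_left]
  rw [PySem.Dict.items_eq_map_keys _ (by rw [hkeys]; exact PySem.Set.nodup_ofList l) 0, hkeys]
  apply List.map_congr_left
  intro a ha
  have hal : a ∈ l := (PySem.Set.mem_ofList l a).1 ha
  rw [PySem.Dict.getD_eq_get?_getD, pv_foldl_insert_get?, if_pos hal]
  rfl

theorem pv_outerA (s l : List Int) (d : PySem.Dict Int Int) (hnd : d.keys.Nodup) :
    l.foldl (fun dic a =>
        s.foldl (fun dic b =>
            if PySem.Int.mod b a = 0 then dic.insert a (dic.getD a 0 + 1) else dic)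
          (dic.insert a 0)) d
      = l.foldl (fun dic a => dic.insert a ((0 : Int) + pvCA s a)) d := by
  induction l generalizing d with
  | nil => rfl
  | cons a l ih =>
    rw [List.foldl_cons, List.foldl_cons]
    have hnd0 : (d.insert a (0 : Int)).keys.Nodup := PySem.Dict.nodup_keys_insert d a 0 hnd
    have hinner := pv_inner_foldl (fun b => decide (PySem.Int.mod b a = 0)) s (d.insert a 0) a
      hnd0 (PySem.Dict.contains_insert_self d a 0)
    simp only [decide_eq_true_eq] at hinner
    rw [hinner, PySem.Dict.getD_insert_self, PySem.Dict.insert_insert_self]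
    rw [ih _ (PySem.Dict.nodup_keys_insert d a _ hnd)]
    rfl

theorem pv_items_eq (s : List Int) (hs : (0 : Int) ∉ s) :
    ((s.foldl (fun d x => d.insert x (d.getD x 0 + 1)) (PySem.Dict.empty : PySem.Dict Int Int)).items.foldl
        (fun d bc => pvSieve bc.1.natAbs bc.2 1 d)
        ((s.foldl (fun d x => d.insert x (d.getD x 0 + 1)) (PySem.Dict.empty : PySem.Dict Int Int)).keys.foldl
          (fun d a => d.insert a (0 : Int)) (PySem.Dict.empty : PySem.Dict Int Int))).items
      = (PySem.Set.ofList s).map (fun a => (a, (0 : Int) + pvCA s a)) := by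
  rw [PySem.Dict.foldl_insert_getD_add_one_eq_counter s, PySem.Dict.keys_counter]
  have hc0get : ∀ x, ((PySem.Set.ofList s).foldl (fun d a => d.insert a (0 : Int))
      (PySem.Dict.empty : PySem.Dict Int Int)).get? x
      = if x ∈ PySem.Set.ofList s then some 0 else none := by
    intro x
    rw [pv_foldl_insert_get? (fun _ => (0 : Int))]
    simp [PySem.Dict.get?_empty]
  have hc0keys : ((PySem.Set.ofList s).foldl (fun d a => d.insert a (0 : Int))
      (PySem.Dict.empty : PySem.Dict Int Int)).keys = PySem.Set.ofList s := by
    rw [PySem.Dict.keys_foldl_insert _ (fun _ _ => (0 : Int)), PySem.Dict.keys_empty,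
      PySem.Set.update_nil_left, PySem.Set.ofList_ofList]
  have hkeys : (((PySem.Dict.counter s).items.foldl (fun d bc => pvSieve bc.1.natAbs bc.2 1 d)
      ((PySem.Set.ofList s).foldl (fun d a => d.insert a (0 : Int))
        (PySem.Dict.empty : PySem.Dict Int Int)))).keys = PySem.Set.ofList s := by
    rw [pvOuter_keys, hc0keys]
  rw [PySem.Dict.items_eq_map_keys _ (by rw [hkeys]; exact PySem.Set.nodup_ofList s) 0, hkeys]
  apply List.map_congr_left
  intro a ha
  have hcont : ((PySem.Set.ofList s).foldl (fun d a => d.insert a (0 : Int))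
      (PySem.Dict.empty : PySem.Dict Int Int)).contains a = true := by
    rw [PySem.Dict.contains_iff_mem_keys, hc0keys]; exact ha
  rw [pvOuter_getD _ _ _ hcont]
  have hget0 : ((PySem.Set.ofList s).foldl (fun d a => d.insert a (0 : Int))
      (PySem.Dict.empty : PySem.Dict Int Int)).getD a 0 = 0 := by
    rw [PySem.Dict.getD_eq_get?_getD, hc0get, if_pos ha]
    rfl
  rw [hget0, PySem.Dict.items_counter, List.map_map]
  have hterm : ∀ b ∈ PySem.Set.ofList s,
      ((fun bc => bc.2 * ((pvDivs bc.1.natAbs 1).count a : Int)) ∘ fun k => (k, (s.count k : Int))) b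
        = (s.count b : Int) * (if (fun b => decide (PySem.Int.mod b a = 0)) b then (1 : Int) else 0) := by
    intro b hb
    have hb0 : b ≠ 0 := fun h => hs (h ▸ (PySem.Set.mem_ofList s b).1 hb)
    have hm : 1 ≤ b.natAbs := by omega
    simp only [Function.comp_apply]
    rw [pvDivs_count_one b.natAbs a hm]
    have hdvd : (a.natAbs ∣ b.natAbs) ↔ PySem.Int.mod b a = 0 := by
      rw [Int.natAbs_dvd_natAbs, PySem.Int.mod_eq_zero_iff_dvd]
    by_cases hc : PySem.Int.mod b a = 0
    · simp [hdvd.2 hc, hc]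
    · have : ¬ a.natAbs ∣ b.natAbs := fun h => hc (hdvd.1 h)
      simp [this, hc]
  rw [List.map_congr_left hterm,
    pv_sum_countP s (PySem.Set.ofList s) _ (PySem.Set.nodup_ofList s)
      (fun x hx => (PySem.Set.mem_ofList s x).2 hx)]
  rfl

theorem pv_main (Liste : List Int) (hpre : (0 : Int) ∉ Liste) :
    epurer2 Liste = epurer2_alt Liste := by
  unfold epurer2 epurer2_alt
  dsimp only
  have hs : (0 : Int) ∉ PySem.List.sorted Liste (fun x => x) false := by
    rw [PySem.List.mem_sorted]; exact hpre
  rw [pv_outerA _ _ _ PySem.Dict.nodup_keys_empty,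
    pv_foldl_insert_items (fun a => (0 : Int) + pvCA (PySem.List.sorted Liste (fun x => x) false) a),
    pv_items_eq _ hs]
  have hfun : (fun (Output : List Int) (elem : Int × Int) =>
      if elem.2 > 1 then Output ++ [elem.1] else Output)
      = (fun Output elem => if (fun (e : Int × Int) => decide (e.2 > 1)) elem = true
          then Output ++ [(fun (e : Int × Int) => e.1) elem] else Output) := by
    funext O e
    simp
  rw [hfun, PySem.List.foldl_append_if]
  simp

-- ===== VERDICT (by name: the statement is the Claim_ definition above) =====
theorem epurer2_spec : Claim_equal_epurer2 := by
  intro Liste _ hpre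
  unfold Spec_epurer2
  exact pv_main Liste hpre
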